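-- pv_equiv track=rewrite | github.com/blankaszigethy/gallows_game | notes.py | create_placeholder
-- ===== SOURCE A (Python) =====
-- def create_placeholder(sentence):
--   placeholder = ""
--
--   i = 0
--
--   while i < len(sentence):
--
--       if sentence[i] == " ":
--           placeholder +=  " "   # += hozzáad a strighez új karaktereket
--       else:
--           placeholder += "_"
--       i = i + 1
--
--   return placeholder
-- ===== SOURCE B (Python) =====
-- def create_placeholder(sentence):
--     return " ".join("_" * len(tok) for tok in sentence.split(" "))
-- ===== Notes on version B (the rewrite author's own statement) =====
-- stated objective: idiomatic
-- what changed: Replaces the per-character index while-loop with repeated string concatenation by a split-on-space / mask-each-token / rejoin pipeline.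
import Mathlib
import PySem

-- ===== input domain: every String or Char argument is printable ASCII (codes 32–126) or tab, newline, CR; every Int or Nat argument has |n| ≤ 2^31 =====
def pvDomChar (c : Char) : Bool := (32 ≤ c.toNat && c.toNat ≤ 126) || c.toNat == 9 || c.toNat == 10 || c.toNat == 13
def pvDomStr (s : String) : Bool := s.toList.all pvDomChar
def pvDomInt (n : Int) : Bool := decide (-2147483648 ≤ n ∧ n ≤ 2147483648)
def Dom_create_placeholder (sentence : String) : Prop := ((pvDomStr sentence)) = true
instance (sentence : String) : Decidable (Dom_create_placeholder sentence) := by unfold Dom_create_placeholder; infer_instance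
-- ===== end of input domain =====

-- ===== PORT A =====
-- B replaces A's per-character index loop with a split-on-space / mask / rejoin pipeline (idiomatic).
def create_placeholder_go (s : List Char) (i : Nat) (acc : List Char) : List Char :=
  if h : i < s.length then
    create_placeholder_go s (i + 1) (acc ++ [if s[i] == ' ' then ' ' else '_'])
  else acc
termination_by s.length - i

def create_placeholder (sentence : String) : String :=
  String.mk (create_placeholder_go sentence.toList 0 [])

-- ===== PORT B =====
def create_placeholder_alt (sentence : String) : String :=
  String.mk (PySem.Chars.join [' ']
    ((PySem.Chars.splitOn sentence.toList [' ']).map (fun tok => List.replicate tok.length '_')))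

-- ===== PRECONDITION & SPEC =====
def Spec_create_placeholder (sentence : String) (out : String) : Prop := out = create_placeholder_alt sentence
instance (sentence : String) (out : String) : Decidable (Spec_create_placeholder sentence out) := by unfold Spec_create_placeholder; infer_instance

-- ===== CLAIM (what is proved, stated in full; the proofs are below) =====
def Claim_equal_create_placeholder : Prop := ∀ (sentence : String), Dom_create_placeholder sentence → Spec_create_placeholder sentence (create_placeholder sentence)

-- ===== LEMMAS AND PROOFS =====

def pvMask (l : List Char) : List Char := l.map (fun c => if c == ' ' then ' ' else '_')

def pvSplitPure (cur : List Char) : List Char → List (List Char)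
  | [] => [cur]
  | c :: rest => if c == ' ' then cur :: pvSplitPure [] rest else pvSplitPure (cur ++ [c]) rest

theorem pvSplitPure_ne_nil (cur : List Char) (l : List Char) : pvSplitPure cur l ≠ [] := by
  induction l generalizing cur with
  | nil => simp [pvSplitPure]
  | cons c rest ih =>
      simp only [pvSplitPure]
      split
      · simp
      · exact ih _

theorem pvGo_spec (fuel : Nat) : ∀ (l cur : List Char) (acc : List (List Char)), l.length < fuel →
    PySem.Chars.splitOn.go [' '] fuel l cur acc = acc.reverse ++ pvSplitPure cur.reverse l := by
  induction fuel with
  | zero => intro l cur acc h; omega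
  | succ fuel ih =>
      intro l cur acc h
      cases l with
      | nil => simp [PySem.Chars.splitOn.go, pvSplitPure]
      | cons c rest =>
          by_cases hc : c = ' '
          · have hpre : ([' '] : List Char).isPrefixOf (c :: rest) = true := by
              simp [hc, List.isPrefixOf]
            simp only [PySem.Chars.splitOn.go, hpre, if_pos, List.length_cons,
              List.length_nil, Nat.zero_add, List.drop_succ_cons, List.drop_zero]
            rw [ih rest [] (cur.reverse :: acc) (by simpa using Nat.lt_of_succ_lt_succ h)]
            simp [pvSplitPure, hc]
          · have hpre : ([' '] : List Char).isPrefixOf (c :: rest) = false := by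
              simp [List.isPrefixOf]; exact fun h' => absurd h'.symm hc
            simp only [PySem.Chars.splitOn.go, hpre, Bool.false_eq_true, if_false]
            rw [ih rest (c :: cur) acc (by simpa using Nat.lt_of_succ_lt_succ h)]
            simp [pvSplitPure, hc]

theorem pvSplitOn_eq (cs : List Char) : PySem.Chars.splitOn cs [' '] = pvSplitPure [] cs := by
  unfold PySem.Chars.splitOn
  rw [pvGo_spec (cs.length + 1) cs [] [] (by omega)]
  simp

theorem pvSplitPure_mask (l : List Char) : ∀ cur,
    PySem.Chars.join [' '] ((pvSplitPure cur l).map (fun tok => List.replicate tok.length '_'))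
      = List.replicate cur.length '_' ++ pvMask l := by
  induction l with
  | nil => intro cur; simp [pvSplitPure, pvMask, PySem.Chars.join_singleton]
  | cons c rest ih =>
      intro cur
      simp only [pvSplitPure]
      by_cases hc : c == ' '
      · rw [if_pos hc]
        obtain ⟨p, ps, hp⟩ : ∃ p ps, pvSplitPure ([] : List Char) rest = p :: ps := by
          cases h : pvSplitPure ([] : List Char) rest with
          | nil => exact absurd h (pvSplitPure_ne_nil _ _)
          | cons p ps => exact ⟨p, ps, rfl⟩
        have h2 := ih ([] : List Char)
        rw [hp] at h2
        simp only [List.length_nil, List.replicate_zero, List.nil_append] at h2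
        rw [List.map_cons] at h2
        rw [hp, List.map_cons, List.map_cons, PySem.Chars.join_cons_cons, h2]
        simp only [pvMask, List.map_cons, if_pos hc, List.append_assoc]
        simp
      · have hc' : c ≠ ' ' := by simpa using hc
        rw [if_neg hc]
        rw [ih (cur ++ [c])]
        simp only [List.length_append, List.length_cons, List.length_nil, Nat.zero_add,
          List.replicate_add, List.replicate_one, List.append_assoc]
        simp [pvMask, hc']

theorem pvGoA_spec (l : List Char) : ∀ i acc, create_placeholder_go l i acc = acc ++ pvMask (l.drop i) := by
  intro i
  induction hi : l.length - i using Nat.strong_induction_on generalizing i with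
  | _ n ih =>
      intro acc
      unfold create_placeholder_go
      by_cases h : i < l.length
      · rw [dif_pos h]
        rw [ih (l.length - (i + 1)) (by omega) (i + 1) rfl]
        have hd : l.drop i = l[i] :: l.drop (i + 1) := List.drop_eq_getElem_cons h
        have hm : pvMask (l.drop i) = (if l[i] == ' ' then ' ' else '_') :: pvMask (l.drop (i + 1)) := by
          rw [hd]; simp only [pvMask, List.map_cons]
        rw [hm]
        simp
      · rw [dif_neg h]
        rw [List.drop_eq_nil_of_le (by omega)]
        simp [pvMask]

-- ===== VERDICT (by name: the statement is the Claim_ definition above) =====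
theorem create_placeholder_spec : Claim_equal_create_placeholder := by
  intro sentence _
  unfold Spec_create_placeholder create_placeholder create_placeholder_alt
  rw [pvGoA_spec, pvSplitOn_eq, pvSplitPure_mask]
  simp
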